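-- pv_equiv track=rewrite | github.com/micro-irfan/BScRepo | data_structure/lazyDikstra.py | numberofNodes
-- ===== SOURCE A (Python) =====
-- def numberofNodes(graph):
-- 	lst = []
-- 	for key, value in graph.items():
-- 		if key not in lst:
-- 			lst.append(key)
-- 		for a in value:
-- 			if a[0] not in lst:
-- 				lst.append(a[0])
-- 	return lst
-- ===== SOURCE B (Python) =====
-- def numberofNodes(graph):
-- 	seq = []
-- 	for key, value in graph.items():
-- 		seq.append(key)
-- 		for a in value:
-- 			seq.append(a[0])
-- 	first = {}
-- 	for i, x in enumerate(seq):
-- 		first.setdefault(x, i)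
-- 	return [x for x, _ in sorted(first.items(), key=lambda kv: kv[1])]
-- ===== Notes on version B (the rewrite author's own statement) =====
-- stated objective: alternative
-- what changed: Instead of A's online dedup by scanning the accumulator for membership, B records each label's first-occurrence index in a dict via setdefault and recovers first-appearance order by sorting the dict items on that index.
import Mathlib
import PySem

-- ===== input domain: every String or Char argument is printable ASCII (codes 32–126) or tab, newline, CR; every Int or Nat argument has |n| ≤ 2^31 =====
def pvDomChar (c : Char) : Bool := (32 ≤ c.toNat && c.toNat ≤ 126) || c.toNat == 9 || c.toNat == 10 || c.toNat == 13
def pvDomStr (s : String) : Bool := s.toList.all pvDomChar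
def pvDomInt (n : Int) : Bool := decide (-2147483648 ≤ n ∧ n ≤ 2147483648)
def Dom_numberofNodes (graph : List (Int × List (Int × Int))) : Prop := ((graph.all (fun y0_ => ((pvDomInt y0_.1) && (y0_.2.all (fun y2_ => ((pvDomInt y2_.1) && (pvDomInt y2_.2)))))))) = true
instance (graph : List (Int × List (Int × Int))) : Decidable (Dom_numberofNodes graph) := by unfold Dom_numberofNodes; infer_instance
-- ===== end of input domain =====

-- B recovers first-appearance order by a different algorithm: it records each label's
-- first index in a dict (setdefault) and SORTS the labels by that recorded index,
-- instead of A's online membership-scan accumulator.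

-- ===== PORT A =====
-- one pass over graph.items(): append key if unseen, then each a[0] if unseen
def numberofNodes (graph : List (Int × List (Int × Int))) : List Int :=
  graph.foldl
    (fun lst kv =>
      let lst1 := if kv.1 ∈ lst then lst else lst ++ [kv.1]
      kv.2.foldl (fun l a => if a.1 ∈ l then l else l ++ [a.1]) lst1)
    []

-- ===== PORT B =====
-- pass 1: flat label sequence; pass 2: first-index dict via setdefault;
-- pass 3: sort labels by recorded first index
def numberofNodes_alt (graph : List (Int × List (Int × Int))) : List Int :=
  let seq := graph.foldl
    (fun s kv => kv.2.foldl (fun s2 a => s2 ++ [a.1]) (s ++ [kv.1])) []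
  let first := (PySem.List.enumerate seq 0).foldl
    (fun d p => d.setdefault p.2 p.1) (PySem.Dict.empty : PySem.Dict Int Int)
  (PySem.List.sorted first.items (fun kv => kv.2)).map (fun kv => kv.1)

-- ===== PRECONDITION & SPEC =====
def Spec_numberofNodes (graph : List (Int × List (Int × Int))) (out : List Int) : Prop := out = numberofNodes_alt graph
instance (graph : List (Int × List (Int × Int))) (out : List Int) : Decidable (Spec_numberofNodes graph out) := by unfold Spec_numberofNodes; infer_instance

-- ===== CLAIM =====
def Claim_equal_numberofNodes : Prop := ∀ (graph : List (Int × List (Int × Int))), Dom_numberofNodes graph → Spec_numberofNodes graph (numberofNodes graph)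

-- ===== LEMMAS AND PROOFS =====

-- A's inner loop over value is a Set.update with the map of first components
theorem pvInner (xs : List (Int × Int)) (init : List Int) :
    xs.foldl (fun l a => if a.1 ∈ l then l else l ++ [a.1]) init
    = PySem.Set.update init (xs.map Prod.fst) := by
  induction xs generalizing init with
  | nil => rfl
  | cons a rest ih =>
      rw [List.foldl_cons, List.map_cons, PySem.Set.update_cons,
        PySem.Set.add_eq_ite, ih]

-- A's whole fold is Set.update with the concatenation of all label blocks
theorem pvFoldA (g : List (Int × List (Int × Int))) (s : List Int) :
    g.foldl
      (fun lst kv =>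
        let lst1 := if kv.1 ∈ lst then lst else lst ++ [kv.1]
        kv.2.foldl (fun l a => if a.1 ∈ l then l else l ++ [a.1]) lst1)
      s
    = PySem.Set.update s (g.flatMap (fun kv => kv.1 :: kv.2.map Prod.fst)) := by
  induction g generalizing s with
  | nil => simp [PySem.Set.update]
  | cons kv rest ih =>
      rw [List.foldl_cons]
      show rest.foldl _ (kv.2.foldl _ (if kv.1 ∈ s then s else s ++ [kv.1])) = _
      rw [pvInner, ih, List.flatMap_cons,
        show (kv.1 :: kv.2.map Prod.fst) ++ rest.flatMap (fun kv => kv.1 :: kv.2.map Prod.fst)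
          = kv.1 :: (kv.2.map Prod.fst ++ rest.flatMap (fun kv => kv.1 :: kv.2.map Prod.fst)) from rfl,
        PySem.Set.update_cons, PySem.Set.add_eq_ite, PySem.Set.update_append]

-- B's collect pass is the same flat label sequence
theorem pvSeqB (g : List (Int × List (Int × Int))) (s : List Int) :
    g.foldl (fun s kv => kv.2.foldl (fun s2 a => s2 ++ [a.1]) (s ++ [kv.1])) s
    = s ++ g.flatMap (fun kv => kv.1 :: kv.2.map Prod.fst) := by
  induction g generalizing s with
  | nil => simp
  | cons kv rest ih =>
      rw [List.foldl_cons, PySem.List.foldl_append_singleton_eq_map (fun a : Int × Int => a.1), ih]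
      simp [List.flatMap_cons]

-- the setdefault loop: keys follow first-appearance order, recorded indices
-- are strictly increasing along the items list and bounded by the index reached
theorem pvDictLoop (seq : List Int) (s : Int) (d : PySem.Dict Int Int)
    (hb : ∀ p ∈ d.items, p.2 < s)
    (hp : (d.items.map Prod.snd).Pairwise (· < ·)) :
    ((PySem.List.enumerate seq s).foldl (fun d p => d.setdefault p.2 p.1) d).keys
      = PySem.Set.update d.keys seq
    ∧ (((PySem.List.enumerate seq s).foldl (fun d p => d.setdefault p.2 p.1) d).items.map
        Prod.snd).Pairwise (· < ·) := by
  induction seq generalizing s d with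
  | nil => exact ⟨rfl, hp⟩
  | cons x xs ih =>
      rw [PySem.List.enumerate_cons, List.foldl_cons]
      by_cases h : d.contains x
      · rw [PySem.Dict.setdefault_of_contains d s h]
        rw [PySem.Set.update_cons, PySem.Set.add_eq_ite,
          if_pos ((PySem.Dict.contains_iff_mem_keys d x).mp h)]
        exact ih (s + 1) d (fun p hm => by have := hb p hm; omega) hp
      · have h' : d.contains x = false := by simpa using h
        rw [PySem.Dict.setdefault_of_not_contains d s h']
        have hitems := PySem.Dict.items_insert_of_not_contains d s h'
        have hkeys := PySem.Dict.keys_insert_of_not_contains d s h'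
        have hb' : ∀ p ∈ (d.insert x s).items, p.2 < s + 1 := by
          intro p hm
          rw [hitems] at hm
          rcases List.mem_append.mp hm with hm | hm
          · have := hb p hm; omega
          · rw [List.mem_singleton] at hm; subst hm; simp
        have hp' : ((d.insert x s).items.map Prod.snd).Pairwise (· < ·) := by
          rw [hitems, List.map_append]
          refine List.pairwise_append.mpr ⟨hp, by simp, ?_⟩
          intro v hv w hw
          simp at hw
          subst hw
          rcases List.mem_map.mp hv with ⟨p, hm, hpv⟩
          subst hpv
          exact hb p hm
        have := ih (s + 1) (d.insert x s) hb' hp'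
        rw [hkeys] at this
        rw [PySem.Set.update_cons, PySem.Set.add_eq_ite,
          if_neg (fun hc => by simp [(PySem.Dict.contains_iff_mem_keys d x).mpr hc] at h')]
        exact this

theorem numberofNodes_eq (graph : List (Int × List (Int × Int))) :
    numberofNodes graph = numberofNodes_alt graph := by
  unfold numberofNodes numberofNodes_alt
  simp only [pvFoldA, pvSeqB, List.nil_append, PySem.Set.update_nil_left]
  obtain ⟨hkeys, hpair⟩ := pvDictLoop
    (graph.flatMap (fun kv => kv.1 :: kv.2.map Prod.fst)) 0 PySem.Dict.empty
    (by simp [PySem.Dict.empty]) (by simp [PySem.Dict.empty])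
  have hsorted := PySem.List.sorted_eq_self_of_pairwise
    (List.foldl (fun d p => d.setdefault p.2 p.1) PySem.Dict.empty
      (PySem.List.enumerate (List.flatMap (fun kv => kv.1 :: List.map Prod.fst kv.2) graph))).items
    (fun kv => kv.2) ((List.pairwise_map.mp hpair).imp (fun h => le_of_lt h))
  rw [hsorted]
  show _ = (List.foldl (fun d p => d.setdefault p.2 p.1) PySem.Dict.empty
      (PySem.List.enumerate (graph.flatMap (fun kv => kv.1 :: kv.2.map Prod.fst)) 0)).keys
  rw [hkeys]
  simp [PySem.Dict.empty, PySem.Dict.keys, PySem.Set.update_nil_left]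

-- ===== VERDICT =====
theorem numberofNodes_spec : Claim_equal_numberofNodes := by
  intro graph _
  exact numberofNodes_eq graph
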